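-- pv_equiv track=rewrite | github.com/EndstoneMC/endweave | tools/diff.py | _filter_descendants
-- ===== SOURCE A (Python) =====
-- def _filter_descendants(paths: list[str], extra_prefixes: list[str]) -> list[str]:
--     """Remove paths that are children of other paths in the same list or of extra prefixes.
--
--     Args:
--         paths: Sorted list of dotted field paths.
--         extra_prefixes: Additional prefixes to filter against (e.g. type_changes paths).
--
--     Returns:
--         Filtered list with only top-level entries.
--     """
--     result = []
--     for path in paths:
--         prefixes = [p + "." for p in result]
--         if any(path.startswith(p) for p in prefixes):
--             continue
--         if any(path.startswith(p) for p in extra_prefixes):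
--             continue
--         result.append(path)
--     return result
-- ===== SOURCE B (Python) =====
-- def _filter_descendants(paths: list[str], extra_prefixes: list[str]) -> list[str]:
--     """Single pass with hash sets: for each path, scan its prefixes once,
--     testing membership in the extra-prefix set and (at dot positions) in the
--     set of already-accepted paths, instead of rescanning both lists."""
--     extras = set(extra_prefixes)
--     accepted = set()
--     result = []
--     for path in paths:
--         skip = False
--         for i in range(len(path) + 1):
--             if path[:i] in extras:
--                 skip = True
--                 break
--             if i < len(path) and path[i] == "." and path[:i] in accepted:
--                 skip = True
--                 break
--         if not skip:
--             accepted.add(path)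
--             result.append(path)
--     return result
-- ===== Notes on version B (the rewrite author's own statement) =====
-- stated objective: faster
-- what changed: Replaces A's per-path rescan of the accepted list (rebuilding dotted prefixes and running startswith against each) and linear scan of extra_prefixes by two hash sets probed once per prefix position of each path in a single pass.
import Mathlib
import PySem

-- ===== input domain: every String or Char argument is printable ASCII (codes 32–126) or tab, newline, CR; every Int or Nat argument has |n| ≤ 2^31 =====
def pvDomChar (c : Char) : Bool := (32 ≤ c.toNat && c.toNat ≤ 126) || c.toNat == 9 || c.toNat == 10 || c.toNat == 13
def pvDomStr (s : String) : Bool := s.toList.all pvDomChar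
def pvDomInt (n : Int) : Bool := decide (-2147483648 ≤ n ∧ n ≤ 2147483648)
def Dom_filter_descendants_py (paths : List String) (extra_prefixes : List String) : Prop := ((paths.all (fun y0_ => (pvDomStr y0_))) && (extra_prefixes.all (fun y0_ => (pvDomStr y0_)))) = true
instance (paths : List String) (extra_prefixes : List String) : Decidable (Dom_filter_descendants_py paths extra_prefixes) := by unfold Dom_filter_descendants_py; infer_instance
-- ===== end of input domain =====

-- B replaces A's per-path rescans of the accepted list and of extra_prefixes by two
-- hash sets probed once per prefix of each path (objective: faster, single pass).

-- ===== PORT A =====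
def filter_descendants_py (paths : List String) (extra_prefixes : List String) : List String :=
  paths.foldl (fun result path =>
    let prefixes := result.map (fun p => p ++ ".")
    if prefixes.any (fun p => PySem.Str.startswith path p) then result
    else if extra_prefixes.any (fun p => PySem.Str.startswith path p) then result
    else result ++ [path]) []

-- ===== PORT B =====
-- inner loop of Source B: scan the prefixes path[:i] of one path (pre = path[:i], rest = path[i:]),
-- breaking (true) when a prefix is in `extras`, or is in `accepted` with a '.' right after it
def bSkip (extras accepted : PySem.Set String) (pre rest : List Char) : Bool :=
  PySem.Set.contains extras (String.ofList pre) ||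
    match rest with
    | [] => false
    | c :: rs =>
      (c == '.' && PySem.Set.contains accepted (String.ofList pre)) ||
        bSkip extras accepted (pre ++ [c]) rs

def filter_descendants_py_alt (paths : List String) (extra_prefixes : List String) : List String :=
  let extras := PySem.Set.ofList extra_prefixes
  (paths.foldl (fun (st : PySem.Set String × List String) path =>
      if bSkip extras st.1 [] path.toList then st
      else (PySem.Set.add st.1 path, st.2 ++ [path]))
    (PySem.Set.empty, [])).2

-- ===== PRECONDITION & SPEC =====
def Spec_filter_descendants_py (paths : List String) (extra_prefixes : List String) (out : List String) : Prop := out = filter_descendants_py_alt paths extra_prefixes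
instance (paths : List String) (extra_prefixes : List String) (out : List String) : Decidable (Spec_filter_descendants_py paths extra_prefixes out) := by unfold Spec_filter_descendants_py; infer_instance

-- ===== CLAIM (what is proved, stated in full; the proofs are below) =====
def Claim_equal_filter_descendants_py : Prop := ∀ (paths : List String) (extra_prefixes : List String), Dom_filter_descendants_py paths extra_prefixes → Spec_filter_descendants_py paths extra_prefixes (filter_descendants_py paths extra_prefixes)

-- ===== LEMMAS AND PROOFS =====

-- characterisation of B's prefix scan
lemma bSkip_iff (extras acc : PySem.Set String) (rest pre : List Char) :
    bSkip extras acc pre rest = true ↔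
      (∃ l, l <+: rest ∧ String.ofList (pre ++ l) ∈ extras) ∨
      (∃ l r', rest = l ++ '.' :: r' ∧ String.ofList (pre ++ l) ∈ acc) := by
  induction rest generalizing pre with
  | nil => simp [bSkip, PySem.Set.contains]
  | cons c rs ih =>
    rw [bSkip]
    simp only [Bool.or_eq_true, Bool.and_eq_true, beq_iff_eq, ih (pre ++ [c]),
      List.append_assoc, List.singleton_append]
    simp only [PySem.Set.contains, List.contains_iff_mem]
    constructor
    · rintro (h | ⟨hc, h⟩ | ⟨l, hl, hm⟩ | ⟨l, r', he, hm⟩)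
      · exact Or.inl ⟨[], List.nil_prefix, by simpa using h⟩
      · exact Or.inr ⟨[], rs, by simp [hc], by simpa using h⟩
      · exact Or.inl ⟨c :: l, List.cons_prefix_cons.mpr ⟨rfl, hl⟩, hm⟩
      · exact Or.inr ⟨c :: l, r', by simp [he], hm⟩
    · rintro (⟨l, hl, hm⟩ | ⟨l, r', he, hm⟩)
      · match l, hl with
        | [], _ => exact Or.inl (by simpa using hm)
        | c' :: l', hl =>
          obtain ⟨rfl, hl'⟩ := List.cons_prefix_cons.mp hl
          exact Or.inr (Or.inr (Or.inl ⟨l', hl', hm⟩))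
      · match l, he with
        | [], he => exact Or.inr (Or.inl ⟨by simpa using congrArg (·.head?) he, by simpa using hm⟩)
        | c' :: l', he =>
          obtain ⟨rfl, he2⟩ : c = c' ∧ rs = l' ++ '.' :: r' := by
            simpa using he
          exact Or.inr (Or.inr (Or.inr ⟨l', r', he2, hm⟩))

-- B's skip test computes exactly A's two `any` tests
lemma skip_eq (eps acc result : List String)
    (h : ∀ x, x ∈ acc ↔ x ∈ result) (path : String) :
    bSkip (PySem.Set.ofList eps) acc [] path.toList =
      ((result.map (fun p => p ++ ".")).any (fun p => PySem.Str.startswith path p)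
       || eps.any (fun p => PySem.Str.startswith path p)) := by
  rw [Bool.eq_iff_iff, bSkip_iff]
  simp only [List.nil_append, PySem.Set.mem_ofList, Bool.or_eq_true, List.any_eq_true,
    List.mem_map, PySem.Str.startswith_eq, PySem.Chars.startswith_iff]
  constructor
  · rintro (⟨l, ⟨t, ht⟩, hm⟩ | ⟨l, r', he, hm⟩)
    · exact Or.inr ⟨String.ofList l, hm, ⟨t, by simpa using ht⟩⟩
    · refine Or.inl ⟨String.ofList l ++ ".", ⟨String.ofList l, (h _).mp hm, rfl⟩, ⟨r', ?_⟩⟩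
      simp [he]
  · rintro (⟨_, ⟨p, hp, rfl⟩, ⟨t, ht⟩⟩ | ⟨p, hp, ⟨t, ht⟩⟩)
    · refine Or.inr ⟨p.toList, t, ?_, (h _).mpr (by simpa using hp)⟩
      simpa using ht.symm
    · exact Or.inl ⟨p.toList, ⟨t, by simpa using ht⟩, by simpa using hp⟩

lemma loop_eq (eps : List String) (paths : List String) (acc : PySem.Set String)
    (result : List String) (h : ∀ x, x ∈ acc ↔ x ∈ result) :
    (paths.foldl (fun (st : PySem.Set String × List String) path =>
        if bSkip (PySem.Set.ofList eps) st.1 [] path.toList then st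
        else (PySem.Set.add st.1 path, st.2 ++ [path])) (acc, result)).2
      = paths.foldl (fun result path =>
          let prefixes := result.map (fun p => p ++ ".")
          if prefixes.any (fun p => PySem.Str.startswith path p) then result
          else if eps.any (fun p => PySem.Str.startswith path p) then result
          else result ++ [path]) result := by
  induction paths generalizing acc result with
  | nil => rfl
  | cons path ps ih =>
    simp only [List.foldl_cons, skip_eq eps acc result h path]
    cases ha : (result.map (fun p => p ++ ".")).any (fun p => PySem.Str.startswith path p) with
    | true => simpa [ha] using ih acc result h
    | false =>
      cases hb : eps.any (fun p => PySem.Str.startswith path p) with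
      | true => simpa [ha, hb] using ih acc result h
      | false =>
        have : (false || false) = true ↔ False := by simp
        simp only [this, Bool.false_eq_true, if_false]
        exact ih (PySem.Set.add acc path) (result ++ [path])
          (by intro x; simp [PySem.Set.mem_add, h x])

-- ===== VERDICT (by name: the statement is the Claim_ definition above) =====
theorem filter_descendants_py_spec : Claim_equal_filter_descendants_py := by
  intro paths eps _
  unfold Spec_filter_descendants_py filter_descendants_py filter_descendants_py_alt
  exact (loop_eq eps paths PySem.Set.empty [] (by simp [PySem.Set.empty])).symm
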